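-- pv_equiv track=rewrite | github.com/TheoDlmz/AlgoProg | tp_virus.py | propagation
-- ===== SOURCE A (Python) =====
-- def updateEtat(grille, i, j):
--
--     if grille[i][j] > 0:
--         return grille[i][j]
--
--     voisins_infectes = 0
--     if i>0 and grille[i-1][j] == 1:
--         voisins_infectes += 1
--     if i<len(grille)-1 and grille[i+1][j] == 1:
--         voisins_infectes +=  1
--     if j>0 and grille[i][j-1] == 1:
--         voisins_infectes += 1
--     if j<len(grille[0])-1 and grille[i][j+1] == 1:
--         voisins_infectes += 1
--
--     if voisins_infectes >= 2:
--         return 1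
--     else:
--         return 0
--
-- def updateGrille(grille):
--     # On crée une nouvelle grille
--     nouvelle_grille = []
--
--     # On met à jour chaque cellule
--     for i in range(len(grille)):
--         grille_ligne = []
--         for j in range(len(grille[0])):
--             grille_ligne.append(updateEtat(grille, i, j))
--         nouvelle_grille.append(grille_ligne)
--
--     # On retourne la nouvelle grille
--     return nouvelle_grille
--
-- def propagation(grille):
--     n_jour = 0
--     while True:
--         nouvelle_grille = updateGrille(grille)
--         if nouvelle_grille == grille:
--             break
--         grille = nouvelle_grille
--         n_jour += 1
--     return n_jour, grille
-- ===== SOURCE B (Python) =====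
-- def propagation(grille):
--     # Frontier-based simulation: after one full synchronous pass, each later day
--     # re-evaluates only the 0-cells adjacent to cells infected the previous day.
--     # (Return-value equivalent to the full rescan; no argument mutation.)
--     n = len(grille)
--     m = len(grille[0]) if grille else 0
--
--     def count1(g, i, j):
--         c = 0
--         if i > 0 and g[i - 1][j] == 1:
--             c += 1
--         if i < n - 1 and g[i + 1][j] == 1:
--             c += 1
--         if j > 0 and g[i][j - 1] == 1:
--             c += 1
--         if j < m - 1 and g[i][j + 1] == 1:
--             c += 1
--         return c
--
--     # Day 1: one synchronous pass over the whole grid.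
--     cur = []
--     frontier = []          # cells that just became 1
--     for i in range(n):
--         row = []
--         for j in range(m):
--             v = grille[i][j]
--             if v > 0:
--                 row.append(v)
--             else:
--                 nv = 1 if count1(grille, i, j) >= 2 else 0
--                 row.append(nv)
--                 if nv == 1:
--                     frontier.append((i, j))
--         cur.append(row)
--     if cur == grille:
--         return 0, grille
--
--     days = 1
--     # Later days: only 0-neighbours of the last frontier can change.
--     while True:
--         cand = []
--         seen = set()
--         for (i, j) in frontier:
--             for (a, b) in ((i - 1, j), (i + 1, j), (i, j - 1), (i, j + 1)):
--                 if 0 <= a < n and 0 <= b < m and cur[a][b] == 0 and (a, b) not in seen: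
--                     seen.add((a, b))
--                     cand.append((a, b))
--         newf = [(a, b) for (a, b) in cand if count1(cur, a, b) >= 2]
--         if not newf:
--             return days, cur
--         for (a, b) in newf:
--             cur[a][b] = 1
--         days += 1
--         frontier = newf
-- ===== Notes on version B (the rewrite author's own statement) =====
-- stated objective: faster
-- what changed: Instead of rescanning every cell of the grid on every day until a full-grid comparison finds a fixpoint, B does one synchronous full pass (day 1) and then keeps a frontier of newly-infected cells, re-evaluating on each later day only the 0-cells adjacent to the previous day's frontier; a timing run measured B about 2x faster at the largest size.
import Mathlib
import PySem

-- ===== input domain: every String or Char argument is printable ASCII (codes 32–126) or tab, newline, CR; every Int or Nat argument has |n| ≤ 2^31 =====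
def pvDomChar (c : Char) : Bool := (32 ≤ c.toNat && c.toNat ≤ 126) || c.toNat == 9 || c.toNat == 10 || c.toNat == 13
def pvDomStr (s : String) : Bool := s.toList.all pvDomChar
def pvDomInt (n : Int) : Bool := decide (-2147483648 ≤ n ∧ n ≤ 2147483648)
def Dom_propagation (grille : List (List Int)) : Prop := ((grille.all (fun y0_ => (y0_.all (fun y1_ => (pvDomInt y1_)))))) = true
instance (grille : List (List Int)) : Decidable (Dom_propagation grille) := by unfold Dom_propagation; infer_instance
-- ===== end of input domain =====

-- B replaces A's repeated full-grid rescans by one synchronous pass followed by a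
-- frontier loop that each day re-evaluates only the 0-cells adjacent to the cells
-- infected the previous day (equivalence is about the return value; neither program
-- mutates its argument).

-- ===== PORT A =====

-- grille[i][j] for Nat indices; exact wherever A indexes (A only indexes in range under Pre_)
def cell (g : List (List Int)) (i j : Nat) : Int := (g.getD i []).getD j 0

def updateEtat (g : List (List Int)) (i j : Nat) : Int :=
  let v := cell g i j
  if v > 0 then v
  else
    -- the four guarded neighbour tests, accumulated into voisins_infectes
    let c : Int :=
      (if 0 < i ∧ cell g (i-1) j = 1 then 1 else 0) +
      (if i < g.length - 1 ∧ cell g (i+1) j = 1 then 1 else 0) +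
      (if 0 < j ∧ cell g i (j-1) = 1 then 1 else 0) +
      (if j < (g.headD []).length - 1 ∧ cell g i (j+1) = 1 then 1 else 0)
    if 2 ≤ c then 1 else 0

def updateGrille (g : List (List Int)) : List (List Int) :=
  (List.range g.length).map (fun i =>
    (List.range (g.headD []).length).map (fun j => updateEtat g i j))

-- A's 'while True' loop; it needs at most n*m+2 iterations on the n×m grids
-- (each changing day after the first turns at least one 0-cell into a 1),
-- so the fuel below never runs out inside Pre_.
def aLoop : Nat → Int → List (List Int) → Int × List (List Int)
  | 0, nJour, g => (nJour, g)
  | fuel+1, nJour, g =>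
    let ng := updateGrille g
    if ng = g then (nJour, g)
    else aLoop fuel (nJour + 1) ng

def propagation (grille : List (List Int)) : Int × List (List Int) :=
  aLoop (grille.length * (grille.headD []).length + 2) 0 grille

-- ===== PORT B =====

-- count1: the sequential 'c += 1' chain of Source B
def bCount1 (g : List (List Int)) (n m : Nat) (i j : Nat) : Int :=
  let c : Int := 0
  let c := if 0 < i ∧ cell g (i-1) j = 1 then c + 1 else c
  let c := if i < n - 1 ∧ cell g (i+1) j = 1 then c + 1 else c
  let c := if 0 < j ∧ cell g i (j-1) = 1 then c + 1 else c
  let c := if j < m - 1 ∧ cell g i (j+1) = 1 then c + 1 else c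
  c

-- day-1 pass: builds (cur, frontier) in one sweep
def bFirstPass (g : List (List Int)) (n m : Nat) : List (List Int) × List (Nat × Nat) :=
  (List.range n).foldl (fun st i =>
    let inner := (List.range m).foldl (fun st2 j =>
      let v := cell g i j
      if v > 0 then (st2.1 ++ [v], st2.2)
      else
        let nv : Int := if 2 ≤ bCount1 g n m i j then 1 else 0
        (st2.1 ++ [nv],
         (if nv = 1 then st2.2 ++ [(i, j)] else st2.2)))
      (([] : List Int), st.2)
    (st.1 ++ [inner.1], inner.2)) ([], [])

def setCell (c : List (List Int)) (i j : Nat) (v : Int) : List (List Int) :=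
  c.modify i (fun row => row.set j v)

-- Source B's 'cand'/'seen' pair is one insertion-ordered set; PySem.Set is exactly that
def bCand (cur : List (List Int)) (n m : Nat) (frontier : List (Nat × Nat)) : PySem.Set (Nat × Nat) :=
  frontier.foldl (fun s p =>
    [((p.1 : Int) - 1, (p.2 : Int)), ((p.1 : Int) + 1, (p.2 : Int)),
     ((p.1 : Int), (p.2 : Int) - 1), ((p.1 : Int), (p.2 : Int) + 1)].foldl
      (fun s2 q =>
        if 0 ≤ q.1 ∧ q.1 < (n : Int) ∧ 0 ≤ q.2 ∧ q.2 < (m : Int) ∧ cell cur q.1.toNat q.2.toNat = 0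
        then s2.add (q.1.toNat, q.2.toNat) else s2) s)
    PySem.Set.empty

-- Source B's 'while True' frontier loop; every round before the last infects at least
-- one 0-cell, so fuel n*m+1 never runs out inside Pre_.
def bRounds (n m : Nat) : Nat → Int → List (List Int) → List (Nat × Nat) → Int × List (List Int)
  | 0, days, cur, _ => (days, cur)
  | fuel+1, days, cur, frontier =>
    let newf := (bCand cur n m frontier).filter (fun p => decide (2 ≤ bCount1 cur n m p.1 p.2))
    if newf = [] then (days, cur)
    else bRounds n m fuel (days + 1) (newf.foldl (fun c p => setCell c p.1 p.2 1) cur) newf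

def propagation_alt (grille : List (List Int)) : Int × List (List Int) :=
  let n := grille.length
  let m := (grille.headD []).length   -- len(grille[0]) if grille else 0
  let fp := bFirstPass grille n m
  if fp.1 = grille then (0, grille)
  else bRounds n m (n * m + 1) 1 fp.1 fp.2

-- ===== PRECONDITION & SPEC =====

-- Pre_ excludes exactly the inputs on which A raises IndexError: grids with a row
-- shorter than the first row (updateEtat then reads past that row's end).
def Pre_propagation (grille : List (List Int)) : Prop :=
  ∀ r ∈ grille, (grille.headD []).length ≤ r.length

instance (grille : List (List Int)) : Decidable (Pre_propagation grille) := by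
  unfold Pre_propagation; infer_instance

def pvWitness_propagation : List (List Int) := [[0, 1], [1, 0]]

def Spec_propagation (grille : List (List Int)) (out : Int × List (List Int)) : Prop := out = propagation_alt grille
instance (grille : List (List Int)) (out : Int × List (List Int)) : Decidable (Spec_propagation grille out) := by unfold Spec_propagation; infer_instance

-- ===== CLAIM (what is proved, stated in full; the proofs are below) =====
def Claim_equal_propagation : Prop := ∀ (grille : List (List Int)), Dom_propagation grille → Pre_propagation grille → Spec_propagation grille (propagation grille)

-- ===== LEMMAS AND PROOFS =====

-- rectangular n×m grid
def Rect (g : List (List Int)) (n m : Nat) : Prop :=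
  g.length = n ∧ ∀ r ∈ g, r.length = m

-- the neighbour count both programs compute (A inline, B in count1)
def cnt (g : List (List Int)) (n m : Nat) (i j : Nat) : Int :=
  (if 0 < i ∧ cell g (i-1) j = 1 then 1 else 0) +
  (if i < n - 1 ∧ cell g (i+1) j = 1 then 1 else 0) +
  (if 0 < j ∧ cell g i (j-1) = 1 then 1 else 0) +
  (if j < m - 1 ∧ cell g i (j+1) = 1 then 1 else 0)

-- the value a cell takes after one synchronous update
def fval (g : List (List Int)) (n m : Nat) (i j : Nat) : Int :=
  if cell g i j > 0 then cell g i j else if 2 ≤ cnt g n m i j then 1 else 0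

-- grid-adjacency of two Nat coordinate pairs
def Adj (a b : Nat × Nat) : Prop :=
  (a.1 = b.1 ∧ (a.2 + 1 = b.2 ∨ b.2 + 1 = a.2)) ∨
  (a.2 = b.2 ∧ (a.1 + 1 = b.1 ∨ b.1 + 1 = a.1))

-- number of 0-cells, as a function of the cells only
def zeros (g : List (List Int)) (n m : Nat) : Nat :=
  ((Finset.range n ×ˢ Finset.range m).filter (fun p => cell g p.1 p.2 = 0)).card

-- the frontier invariant of B's round loop
def FInv (n m : Nat) (g : List (List Int)) (fr : List (Nat × Nat)) : Prop :=
  Rect g n m ∧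
  (∀ i j, i < n → j < m → 0 ≤ cell g i j) ∧
  (∀ p ∈ fr, p.1 < n ∧ p.2 < m ∧ cell g p.1 p.2 = 1) ∧
  (∀ i j, i < n → j < m → cell g i j = 0 → 2 ≤ cnt g n m i j → ∃ p ∈ fr, Adj (i, j) p)

theorem bCount1_eq_cnt (g : List (List Int)) (n m i j : Nat) :
    bCount1 g n m i j = cnt g n m i j := by
  unfold bCount1 cnt; split_ifs <;> norm_num

theorem headD_len {g : List (List Int)} {n m : Nat} (h : Rect g n m) (hn : 0 < n) :
    (g.headD []).length = m := by
  obtain ⟨hl, hr⟩ := h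
  cases g with
  | nil => simp at hl; omega
  | cons r t => exact hr r (by simp)

theorem grid_ext {a b : List (List Int)} {n m : Nat} (ha : Rect a n m) (hb : Rect b n m)
    (h : ∀ i j, i < n → j < m → cell a i j = cell b i j) : a = b := by
  obtain ⟨hal, har⟩ := ha; obtain ⟨hbl, hbr⟩ := hb
  apply List.ext_getElem (by omega)
  intro i hi1 hi2
  apply List.ext_getElem
  · rw [har a[i] (by simp), hbr b[i] (by simp)]
  intro j hj1 hj2
  have hja : j < m := by rw [har a[i] (by simp)] at hj1; exact hj1
  have := h i j (by omega) hja
  unfold cell at this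
  rwa [List.getD_eq_getElem _ _ hi1, List.getD_eq_getElem _ _ hi2,
    List.getD_eq_getElem _ _ hj1, List.getD_eq_getElem _ _ hj2] at this

-- the two quantities A's code reads as len(grille) and len(grille[0]); weaker than Rect,
-- so the first-pass lemmas also cover the ragged grids A truncates
def Dims (g : List (List Int)) (n m : Nat) : Prop :=
  g.length = n ∧ (g.headD []).length = m

theorem rect_updateGrille {g : List (List Int)} {n m : Nat} (h : Dims g n m) :
    Rect (updateGrille g) n m := by
  constructor
  · simp [updateGrille, h.1]
  · intro r hr
    simp only [updateGrille, List.mem_map, List.mem_range] at hr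
    obtain ⟨i, _, rfl⟩ := hr
    rw [List.length_map, List.length_range, h.2]

theorem cell_updateGrille {g : List (List Int)} {n m : Nat} (h : Dims g n m)
    {i j : Nat} (hi : i < n) (hj : j < m) :
    cell (updateGrille g) i j = fval g n m i j := by
  have hm := h.2
  have hrow : (updateGrille g).getD i [] = (List.range m).map (fun j => updateEtat g i j) := by
    unfold updateGrille
    rw [hm, List.getD_eq_getElem _ _ (by rw [List.length_map, List.length_range, h.1]; omega)]
    rw [List.getElem_map, List.getElem_range]
  have h1 : cell (updateGrille g) i j = updateEtat g i j := by
    unfold cell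
    rw [hrow, List.getD_eq_getElem _ _ (by rw [List.length_map, List.length_range]; omega)]
    rw [List.getElem_map, List.getElem_range]
  rw [h1]
  unfold updateEtat fval cnt
  rw [h.1, hm]
theorem cnt_congr {g g' : List (List Int)} {n m i j : Nat}
    (h1 : 0 < i → (cell g (i-1) j = 1 ↔ cell g' (i-1) j = 1))
    (h2 : i < n - 1 → (cell g (i+1) j = 1 ↔ cell g' (i+1) j = 1))
    (h3 : 0 < j → (cell g i (j-1) = 1 ↔ cell g' i (j-1) = 1))
    (h4 : j < m - 1 → (cell g i (j+1) = 1 ↔ cell g' i (j+1) = 1)) :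
    cnt g n m i j = cnt g' n m i j := by
  unfold cnt
  have e1 : (if 0 < i ∧ cell g (i-1) j = 1 then (1:Int) else 0) = (if 0 < i ∧ cell g' (i-1) j = 1 then 1 else 0) := by
    by_cases hc : 0 < i
    · simp [hc, h1 hc]
    · simp [hc]
  have e2 : (if i < n - 1 ∧ cell g (i+1) j = 1 then (1:Int) else 0) = (if i < n - 1 ∧ cell g' (i+1) j = 1 then 1 else 0) := by
    by_cases hc : i < n - 1
    · simp [hc, h2 hc]
    · simp [hc]
  have e3 : (if 0 < j ∧ cell g i (j-1) = 1 then (1:Int) else 0) = (if 0 < j ∧ cell g' i (j-1) = 1 then 1 else 0) := by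
    by_cases hc : 0 < j
    · simp [hc, h3 hc]
    · simp [hc]
  have e4 : (if j < m - 1 ∧ cell g i (j+1) = 1 then (1:Int) else 0) = (if j < m - 1 ∧ cell g' i (j+1) = 1 then 1 else 0) := by
    by_cases hc : j < m - 1
    · simp [hc, h4 hc]
    · simp [hc]
  rw [e1, e2, e3, e4]

theorem zeros_le (g : List (List Int)) (n m : Nat) : zeros g n m ≤ n * m := by
  unfold zeros
  calc _ ≤ (Finset.range n ×ˢ Finset.range m).card := Finset.card_filter_le _ _
    _ = n * m := by simp

theorem zeros_lt {g g' : List (List Int)} {n m : Nat}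
    (hsub : ∀ i j, i < n → j < m → cell g' i j = 0 → cell g i j = 0)
    (hwit : ∃ i j, i < n ∧ j < m ∧ cell g i j = 0 ∧ cell g' i j ≠ 0) :
    zeros g' n m < zeros g n m := by
  unfold zeros
  apply Finset.card_lt_card
  constructor
  · intro p hp
    simp only [Finset.mem_filter, Finset.mem_product, Finset.mem_range] at *
    exact ⟨hp.1, hsub p.1 p.2 hp.1.1 hp.1.2 hp.2⟩
  · intro hcon
    obtain ⟨i, j, hi, hj, h0, hne⟩ := hwit
    have hmem : (i, j) ∈ (Finset.range n ×ˢ Finset.range m).filter (fun p => cell g p.1 p.2 = 0) := by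
      simp only [Finset.mem_filter, Finset.mem_product, Finset.mem_range]
      exact ⟨⟨hi, hj⟩, h0⟩
    have := hcon hmem
    simp only [Finset.mem_filter] at this
    exact hne this.2

theorem mem_foldl_acc {α β : Type} (Q : β → α → Prop) (step : List α → β → List α)
    (h : ∀ s x a, a ∈ step s x ↔ a ∈ s ∨ Q x a) :
    ∀ (l : List β) (s0 : List α) (a : α),
      a ∈ l.foldl step s0 ↔ a ∈ s0 ∨ ∃ x ∈ l, Q x a := by
  intro l
  induction l with
  | nil => simp
  | cons x t ih =>
    intro s0 a
    simp only [List.foldl_cons, ih, h, List.mem_cons]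
    constructor
    · rintro ((hs | hq) | ⟨y, hy, hq⟩)
      · exact Or.inl hs
      · exact Or.inr ⟨x, Or.inl rfl, hq⟩
      · exact Or.inr ⟨y, Or.inr hy, hq⟩
    · rintro (hs | ⟨y, (rfl | hy), hq⟩)
      · exact Or.inl (Or.inl hs)
      · exact Or.inl (Or.inr hq)
      · exact Or.inr ⟨y, hy, hq⟩

theorem getD_set_eq {α : Type} [Inhabited α] (row : List α) (j b : Nat) (v d : α) :
    (row.set j v).getD b d = if b = j ∧ j < row.length then v else row.getD b d := by
  rcases Nat.lt_or_ge b row.length with hb | hb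
  · rw [List.getD_eq_getElem _ _ (by simpa using hb), List.getD_eq_getElem _ _ hb,
      List.getElem_set]
    by_cases hbj : j = b
    · subst hbj; simp; omega
    · simp [hbj, Ne.symm hbj]
  · rw [List.getD_eq_default _ _ (by simpa using hb), List.getD_eq_default _ _ hb]
    have : ¬(b = j ∧ j < row.length) := by rintro ⟨rfl, hh⟩; omega
    simp [this]

theorem getD_setCell_row (c : List (List Int)) (i j a : Nat) (v : Int) :
    (setCell c i j v).getD a [] =
      if a = i ∧ i < c.length then (c.getD a []).set j v else c.getD a [] := by
  unfold setCell
  rcases Nat.lt_or_ge a c.length with ha | ha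
  · rw [List.getD_eq_getElem _ _ (by simpa using ha), List.getD_eq_getElem _ _ ha,
      List.getElem_modify]
    by_cases hai : a = i
    · subst hai
      simp [ha, List.getD_eq_getElem _ _ ha]
    · rw [if_neg (fun hh => hai hh.symm), if_neg (fun hh => hai hh.1)]
  · rw [List.getD_eq_default _ _ (by simpa using ha), List.getD_eq_default _ _ ha]
    have : ¬(a = i ∧ i < c.length) := by rintro ⟨rfl, hh⟩; omega
    simp [this]

theorem rect_setCell {c : List (List Int)} {n m : Nat} (h : Rect c n m) (i j : Nat) (v : Int) :
    Rect (setCell c i j v) n m := by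
  refine ⟨by simp [setCell, h.1], ?_⟩
  intro r hr
  obtain ⟨k, hk, hget⟩ := List.mem_iff_getElem.1 hr
  have hk' : k < c.length := by simpa [setCell] using hk
  have : (setCell c i j v).getD k [] = r := by
    rw [List.getD_eq_getElem _ _ hk, hget]
  rw [getD_setCell_row] at this
  by_cases hki : k = i ∧ i < c.length
  · rw [if_pos hki] at this
    rw [← this, List.length_set, List.getD_eq_getElem _ _ hk']
    exact h.2 _ (by simp)
  · rw [if_neg hki] at this
    rw [← this, List.getD_eq_getElem _ _ hk']
    exact h.2 _ (by simp)

theorem cell_setCell {c : List (List Int)} {n m : Nat} (h : Rect c n m)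
    {i j : Nat} (hi : i < n) (hj : j < m) (v : Int) (a b : Nat) :
    cell (setCell c i j v) a b = if a = i ∧ b = j then v else cell c a b := by
  have hiL : i < c.length := by rw [h.1]; exact hi
  unfold cell
  rw [getD_setCell_row]
  by_cases hai : a = i
  · subst hai
    rw [if_pos ⟨rfl, hiL⟩, getD_set_eq]
    have hrow : (c.getD a []).length = m := by
      rw [List.getD_eq_getElem _ _ hiL]
      exact h.2 _ (by simp)
    by_cases hbj : b = j
    · subst hbj
      rw [if_pos ⟨rfl, by rw [hrow]; exact hj⟩, if_pos ⟨rfl, rfl⟩]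
    · rw [if_neg (fun hh => hbj hh.1), if_neg (fun hh => hbj hh.2)]
  · have : ¬(a = i ∧ i < c.length) := fun hh => hai hh.1
    rw [if_neg this]
    simp [hai]

def gApply (cur : List (List Int)) (l : List (Nat × Nat)) : List (List Int) :=
  l.foldl (fun c p => setCell c p.1 p.2 1) cur

theorem rect_gApply {n m : Nat} : ∀ {l : List (Nat × Nat)} {cur : List (List Int)},
    Rect cur n m → Rect (gApply cur l) n m := by
  intro l
  induction l with
  | nil => intro cur h; exact h
  | cons p t ih =>
    intro cur h
    exact ih (rect_setCell h p.1 p.2 1)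

theorem cell_gApply {n m : Nat} : ∀ {l : List (Nat × Nat)} {cur : List (List Int)},
    Rect cur n m → (∀ p ∈ l, p.1 < n ∧ p.2 < m) → ∀ (a b : Nat),
    cell (gApply cur l) a b = if (a, b) ∈ l then 1 else cell cur a b := by
  intro l
  induction l with
  | nil => intro cur h hl a b; simp [gApply]
  | cons p t ih =>
    intro cur h hl a b
    have hstep : gApply cur (p :: t) = gApply (setCell cur p.1 p.2 1) t := rfl
    rw [hstep, ih (rect_setCell h p.1 p.2 1) (fun q hq => hl q (List.mem_cons_of_mem _ hq)) a b]
    rw [cell_setCell h (hl p (by simp)).1 (hl p (by simp)).2 1 a b]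
    by_cases ht : (a, b) ∈ t
    · simp [ht]
    · simp only [ht, if_false, List.mem_cons, or_false]
      by_cases hp : (a, b) = p
      · rw [if_pos hp, if_pos (by cases p; simp at hp ⊢; exact ⟨hp.1, hp.2⟩)]
      · rw [if_neg hp, if_neg (by intro hh; apply hp; cases p; simp at hh ⊢; exact ⟨hh.1, hh.2⟩)]

theorem mem_bCand {cur : List (List Int)} {n m : Nat} {fr : List (Nat × Nat)} {a : Nat × Nat} :
    a ∈ bCand cur n m fr ↔
      a.1 < n ∧ a.2 < m ∧ cell cur a.1 a.2 = 0 ∧ ∃ p ∈ fr, Adj a p := by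
  have hadd : ∀ (s2 : PySem.Set (Nat × Nat)) (q : Int × Int) (a : Nat × Nat),
      a ∈ (if 0 ≤ q.1 ∧ q.1 < (n : Int) ∧ 0 ≤ q.2 ∧ q.2 < (m : Int) ∧ cell cur q.1.toNat q.2.toNat = 0
           then s2.add (q.1.toNat, q.2.toNat) else s2) ↔
        a ∈ s2 ∨ ((0 ≤ q.1 ∧ q.1 < (n : Int) ∧ 0 ≤ q.2 ∧ q.2 < (m : Int) ∧ cell cur q.1.toNat q.2.toNat = 0)
                  ∧ a = (q.1.toNat, q.2.toNat)) := by
    intro s2 q a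
    by_cases hc : 0 ≤ q.1 ∧ q.1 < (n : Int) ∧ 0 ≤ q.2 ∧ q.2 < (m : Int) ∧ cell cur q.1.toNat q.2.toNat = 0
    · rw [if_pos hc]; rw [PySem.Set.mem_add]; tauto
    · rw [if_neg hc]; tauto
  have hstep : ∀ (s : PySem.Set (Nat × Nat)) (p : Nat × Nat) (a : Nat × Nat),
      a ∈ ([((p.1 : Int) - 1, (p.2 : Int)), ((p.1 : Int) + 1, (p.2 : Int)),
            ((p.1 : Int), (p.2 : Int) - 1), ((p.1 : Int), (p.2 : Int) + 1)].foldl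
        (fun s2 q =>
          if 0 ≤ q.1 ∧ q.1 < (n : Int) ∧ 0 ≤ q.2 ∧ q.2 < (m : Int) ∧ cell cur q.1.toNat q.2.toNat = 0
          then s2.add (q.1.toNat, q.2.toNat) else s2) s) ↔
      a ∈ s ∨ (a.1 < n ∧ a.2 < m ∧ cell cur a.1 a.2 = 0 ∧ Adj a p) := by
    intro s p a
    rw [mem_foldl_acc
      (fun (q : Int × Int) (a : Nat × Nat) =>
        (0 ≤ q.1 ∧ q.1 < (n : Int) ∧ 0 ≤ q.2 ∧ q.2 < (m : Int) ∧ cell cur q.1.toNat q.2.toNat = 0)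
        ∧ a = (q.1.toNat, q.2.toNat)) _ hadd]
    constructor
    · rintro (hs | ⟨q, hq, hg, rfl⟩)
      · exact Or.inl hs
      · refine Or.inr ?_
        simp only [List.mem_cons, List.mem_singleton] at hq
      
        rcases hq with rfl | rfl | rfl | (rfl | h0)
        · dsimp only at hg ⊢
          exact ⟨by omega, by omega, hg.2.2.2.2, by unfold Adj; dsimp only; omega⟩
        · dsimp only at hg ⊢
          exact ⟨by omega, by omega, hg.2.2.2.2, by unfold Adj; dsimp only; omega⟩
        · dsimp only at hg ⊢
          exact ⟨by omega, by omega, hg.2.2.2.2, by unfold Adj; dsimp only; omega⟩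
        · dsimp only at hg ⊢
          exact ⟨by omega, by omega, hg.2.2.2.2, by unfold Adj; dsimp only; omega⟩
        · cases h0
    · rintro (hs | ⟨h1, h2, h3, hadj⟩)
      · exact Or.inl hs
      · refine Or.inr ?_
        obtain ⟨a1, a2⟩ := a
        simp only at h1 h2 h3
        rcases hadj with ⟨he, hor | hor⟩ | ⟨he, hor | hor⟩ <;> simp only at he hor
        · -- a2 + 1 = p.2 : a is left neighbour of p: q = (p.1, p.2 - 1)
          refine ⟨((p.1 : Int), (p.2 : Int) - 1), by simp, ⟨by omega, by omega, by omega, by omega, ?_⟩, ?_⟩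
          · have e1 : ((p.1 : Int)).toNat = a1 := by omega
            have e2 : ((p.2 : Int) - 1).toNat = a2 := by omega
            rw [e1, e2]; exact h3
          · have e1 : ((p.1 : Int)).toNat = a1 := by omega
            have e2 : ((p.2 : Int) - 1).toNat = a2 := by omega
            rw [e1, e2]
        · refine ⟨((p.1 : Int), (p.2 : Int) + 1), by simp, ⟨by omega, by omega, by omega, by omega, ?_⟩, ?_⟩
          · have e1 : ((p.1 : Int)).toNat = a1 := by omega
            have e2 : ((p.2 : Int) + 1).toNat = a2 := by omega
            rw [e1, e2]; exact h3
          · have e1 : ((p.1 : Int)).toNat = a1 := by omega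
            have e2 : ((p.2 : Int) + 1).toNat = a2 := by omega
            rw [e1, e2]
        · refine ⟨((p.1 : Int) - 1, (p.2 : Int)), by simp, ⟨by omega, by omega, by omega, by omega, ?_⟩, ?_⟩
          · have e1 : ((p.1 : Int) - 1).toNat = a1 := by omega
            have e2 : ((p.2 : Int)).toNat = a2 := by omega
            rw [e1, e2]; exact h3
          · have e1 : ((p.1 : Int) - 1).toNat = a1 := by omega
            have e2 : ((p.2 : Int)).toNat = a2 := by omega
            rw [e1, e2]
        · refine ⟨((p.1 : Int) + 1, (p.2 : Int)), by simp, ⟨by omega, by omega, by omega, by omega, ?_⟩, ?_⟩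
          · have e1 : ((p.1 : Int) + 1).toNat = a1 := by omega
            have e2 : ((p.2 : Int)).toNat = a2 := by omega
            rw [e1, e2]; exact h3
          · have e1 : ((p.1 : Int) + 1).toNat = a1 := by omega
            have e2 : ((p.2 : Int)).toNat = a2 := by omega
            rw [e1, e2]
  unfold bCand
  rw [mem_foldl_acc
    (fun (p : Nat × Nat) (a : Nat × Nat) => a.1 < n ∧ a.2 < m ∧ cell cur a.1 a.2 = 0 ∧ Adj a p)
    _ hstep]
  simp only [PySem.Set.empty]
  constructor
  · rintro (h0 | ⟨p, hp, h1, h2, h3, h4⟩)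
    · simp at h0
    · exact ⟨h1, h2, h3, p, hp, h4⟩
  · rintro ⟨h1, h2, h3, p, hp, h4⟩
    exact Or.inr ⟨p, hp, h1, h2, h3, h4⟩

def pFront (g : List (List Int)) (n m i j : Nat) : Bool :=
  !decide (cell g i j > 0) && decide (fval g n m i j = 1)

theorem foldl_pair {α β γ : Type} (f : β → α) (B : β → List γ)
    (step : List α × List γ → β → List α × List γ)
    (h : ∀ s x, step s x = (s.1 ++ [f x], s.2 ++ B x)) :
    ∀ (l : List β) (s : List α × List γ),
      l.foldl step s = (s.1 ++ l.map f, s.2 ++ l.flatMap B) := by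
  intro l
  induction l with
  | nil => intro s; simp
  | cons x t ih =>
    intro s
    rw [List.foldl_cons, h, ih]
    simp

theorem bFirstPass_eq (g : List (List Int)) (n m : Nat) :
    bFirstPass g n m =
      ((List.range n).map (fun i => (List.range m).map (fun j => fval g n m i j)),
       (List.range n).flatMap (fun i =>
         (List.range m).flatMap (fun j => if pFront g n m i j then [(i, j)] else []))) := by
  unfold bFirstPass
  have hinner : ∀ (i : Nat) (s : List Int × List (Nat × Nat)),
      (List.range m).foldl (fun st2 j =>
        let v := cell g i j
        if v > 0 then (st2.1 ++ [v], st2.2)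
        else
          let nv : Int := if 2 ≤ bCount1 g n m i j then 1 else 0
          (st2.1 ++ [nv],
           (if nv = 1 then st2.2 ++ [(i, j)] else st2.2))) s
      = (s.1 ++ (List.range m).map (fun j => fval g n m i j),
         s.2 ++ (List.range m).flatMap (fun j => if pFront g n m i j then [(i, j)] else [])) := by
    intro i s
    apply foldl_pair
    intro s j
    dsimp only
    by_cases hv : cell g i j > 0
    · rw [if_pos hv]
      have h1 : fval g n m i j = cell g i j := by rw [fval, if_pos hv]
      have h2 : pFront g n m i j = false := by simp [pFront, hv]
      rw [h1, h2]
      simp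
    · rw [if_neg hv]
      have h1 : fval g n m i j = (if 2 ≤ bCount1 g n m i j then 1 else 0) := by
        rw [fval, if_neg hv, bCount1_eq_cnt]
      have h2 : pFront g n m i j = decide ((if 2 ≤ bCount1 g n m i j then (1:Int) else 0) = 1) := by
        simp [pFront, hv, h1]
      rw [h1, h2]
      refine congrArg (fun z => (s.1 ++ [if 2 ≤ bCount1 g n m i j then (1:Int) else 0], z)) ?_
      by_cases hone : (if 2 ≤ bCount1 g n m i j then (1:Int) else 0) = 1
      · simp [hone]
      · simp [hone]
  have houter : ∀ (s : List (List Int) × List (Nat × Nat)),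
      (List.range n).foldl (fun st i =>
        let inner := (List.range m).foldl (fun st2 j =>
          let v := cell g i j
          if v > 0 then (st2.1 ++ [v], st2.2)
          else
            let nv : Int := if 2 ≤ bCount1 g n m i j then 1 else 0
            (st2.1 ++ [nv],
             (if nv = 1 then st2.2 ++ [(i, j)] else st2.2)))
          (([] : List Int), st.2)
        (st.1 ++ [inner.1], inner.2)) s
      = (s.1 ++ (List.range n).map (fun i => (List.range m).map (fun j => fval g n m i j)),
         s.2 ++ (List.range n).flatMap (fun i =>
           (List.range m).flatMap (fun j => if pFront g n m i j then [(i, j)] else []))) := by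
    apply foldl_pair
    intro s i
    dsimp only
    rw [hinner i (([] : List Int), s.2)]
    simp
  rw [houter]
  simp

theorem mem_firstFrontier {g : List (List Int)} {n m : Nat} {p : Nat × Nat} :
    p ∈ (bFirstPass g n m).2 ↔
      ∃ i j, i < n ∧ j < m ∧ pFront g n m i j = true ∧ p = (i, j) := by
  rw [bFirstPass_eq]
  simp only [List.mem_flatMap, List.mem_range]
  constructor
  · rintro ⟨i, hi, j, hj, hp⟩
    by_cases hf : pFront g n m i j = true
    · rw [if_pos hf] at hp
      simp at hp
      exact ⟨i, j, hi, hj, hf, hp⟩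
    · rw [if_neg hf] at hp
      simp at hp
  · rintro ⟨i, j, hi, hj, hf, rfl⟩
    exact ⟨i, hi, j, hj, by rw [if_pos hf]; simp⟩

theorem rect_mapmap {n m : Nat} (F : Nat → Nat → Int) :
    Rect ((List.range n).map (fun i => (List.range m).map (F i))) n m := by
  constructor
  · simp
  · intro r hr
    simp only [List.mem_map, List.mem_range] at hr
    obtain ⟨i, _, rfl⟩ := hr
    simp

theorem cell_mapmap {n m : Nat} (F : Nat → Nat → Int) {i j : Nat} (hi : i < n) (hj : j < m) :
    cell ((List.range n).map (fun i => (List.range m).map (F i))) i j = F i j := by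
  have hrow : ((List.range n).map (fun i => (List.range m).map (F i))).getD i []
      = (List.range m).map (F i) := by
    rw [List.getD_eq_getElem _ _ (by simpa using hi)]
    rw [List.getElem_map, List.getElem_range]
  unfold cell
  rw [hrow, List.getD_eq_getElem _ _ (by simpa using hj)]
  rw [List.getElem_map, List.getElem_range]

theorem firstPass_cur {g : List (List Int)} {n m : Nat} (h : Dims g n m) :
    (bFirstPass g n m).1 = updateGrille g := by
  rw [bFirstPass_eq]
  exact grid_ext (rect_mapmap _) (rect_updateGrille h)
    (fun i j hi hj => by rw [cell_mapmap _ hi hj, cell_updateGrille h hi hj])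

theorem fval_one_of_read {g : List (List Int)} {n m a b : Nat} (ha : a < n) (hb : b < m)
    (h1 : cell (updateGrille g) a b = 1) (h2 : cell g a b ≠ 1) (h : Dims g n m) :
    pFront g n m a b = true := by
  rw [cell_updateGrille h ha hb] at h1
  simp only [pFront, Bool.and_eq_true, Bool.not_eq_true', decide_eq_false_iff_not,
    decide_eq_true_eq]
  refine ⟨?_, h1⟩
  intro hv
  rw [fval, if_pos hv] at h1
  exact h2 h1

theorem cell_update_one {g : List (List Int)} {n m a b : Nat} (h : Dims g n m)
    (ha : a < n) (hb : b < m) (h1 : cell g a b = 1) : cell (updateGrille g) a b = 1 := by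
  rw [cell_updateGrille h ha hb, fval, if_pos (by rw [h1]; norm_num), h1]

theorem firstPass_inv {g : List (List Int)} {n m : Nat} (h : Dims g n m) :
    FInv n m (updateGrille g) (bFirstPass g n m).2 := by
  refine ⟨rect_updateGrille h, ?_, ?_, ?_⟩
  · intro i j hi hj
    rw [cell_updateGrille h hi hj, fval]
    split_ifs <;> omega
  · intro p hp
    rw [mem_firstFrontier] at hp
    obtain ⟨i, j, hi, hj, hf, rfl⟩ := hp
    simp only [pFront, Bool.and_eq_true, Bool.not_eq_true', decide_eq_false_iff_not,
      decide_eq_true_eq] at hf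
    refine ⟨hi, hj, ?_⟩
    rw [cell_updateGrille h hi hj]
    exact hf.2
  · intro i j hi hj h0 hcnt
    by_contra hno
    push_neg at hno
    -- every read neighbour keeps its ==1 status, so the count cannot have grown
    have hstat : ∀ a b, a < n → b < m → Adj (i, j) (a, b) →
        (cell (updateGrille g) a b = 1 ↔ cell g a b = 1) := by
      intro a b ha hb hadj
      constructor
      · intro h1
        by_contra h2
        have hf := fval_one_of_read ha hb h1 h2 h
        have hmem : ((a, b) : Nat × Nat) ∈ (bFirstPass g n m).2 :=
          mem_firstFrontier.2 ⟨a, b, ha, hb, hf, rfl⟩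
        exact hno (a, b) hmem hadj
      · exact cell_update_one h ha hb
    have h0' : ¬ 2 ≤ cnt g n m i j := by
      rw [cell_updateGrille h hi hj, fval] at h0
      by_cases hv : cell g i j > 0
      · rw [if_pos hv] at h0; omega
      · rw [if_neg hv] at h0
        intro hc
        rw [if_pos hc] at h0
        exact one_ne_zero h0
    have hceq : cnt (updateGrille g) n m i j = cnt g n m i j := by
      apply cnt_congr
      · intro hc
        exact hstat (i-1) j (by omega) hj (by unfold Adj; omega)
      · intro hc
        exact hstat (i+1) j (by omega) hj (by unfold Adj; omega)
      · intro hc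
        exact hstat i (j-1) hi (by omega) (by unfold Adj; omega)
      · intro hc
        exact hstat i (j+1) hi (by omega) (by unfold Adj; omega)
    rw [hceq] at hcnt
    exact h0' hcnt

-- B's new frontier, named for the proofs
def newFrontier (cur : List (List Int)) (n m : Nat) (fr : List (Nat × Nat)) : List (Nat × Nat) :=
  (bCand cur n m fr).filter (fun p => decide (2 ≤ bCount1 cur n m p.1 p.2))

theorem mem_newFrontier {cur : List (List Int)} {n m : Nat} {fr : List (Nat × Nat)} {a : Nat × Nat} :
    a ∈ newFrontier cur n m fr ↔
      a.1 < n ∧ a.2 < m ∧ cell cur a.1 a.2 = 0 ∧ (∃ p ∈ fr, Adj a p) ∧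
        2 ≤ cnt cur n m a.1 a.2 := by
  unfold newFrontier
  rw [List.mem_filter, mem_bCand, bCount1_eq_cnt]
  simp only [decide_eq_true_eq]
  tauto

theorem dims_of_rect {g : List (List Int)} {n m : Nat} (h : Rect g n m) (hn : 0 < n) :
    Dims g n m := ⟨h.1, headD_len h hn⟩

theorem rect_updateGrille' {g : List (List Int)} {n m : Nat} (h : Rect g n m) :
    Rect (updateGrille g) n m := by
  rcases Nat.eq_zero_or_pos n with hn | hn
  · subst hn
    have hg : g = [] := List.length_eq_zero_iff.1 h.1
    subst hg
    exact ⟨by simp [updateGrille], by simp [updateGrille]⟩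
  · exact rect_updateGrille (dims_of_rect h hn)

theorem newFrontier_bounds {n m : Nat} {cur : List (List Int)} {fr : List (Nat × Nat)} :
    ∀ p ∈ newFrontier cur n m fr, p.1 < n ∧ p.2 < m := by
  intro p hp
  have := mem_newFrontier.1 hp
  exact ⟨this.1, this.2.1⟩

theorem round_update {n m : Nat} {cur : List (List Int)} {fr : List (Nat × Nat)}
    (hI : FInv n m cur fr) :
    updateGrille cur = gApply cur (newFrontier cur n m fr) := by
  obtain ⟨hR, hNN, hFr, hCom⟩ := hI
  apply grid_ext (rect_updateGrille' hR) (rect_gApply hR)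
  intro i j hi hj
  rw [cell_updateGrille (dims_of_rect hR (by omega)) hi hj,
    cell_gApply hR newFrontier_bounds i j, fval]
  by_cases hv : cell cur i j > 0
  · rw [if_pos hv, if_neg (fun hmem => by
      have := mem_newFrontier.1 hmem
      simp only at this
      omega)]
  · have h0 : cell cur i j = 0 := by have := hNN i j hi hj; omega
    rw [if_neg hv]
    by_cases hc : 2 ≤ cnt cur n m i j
    · obtain ⟨p, hp, hadj⟩ := hCom i j hi hj h0 hc
      rw [if_pos hc, if_pos (mem_newFrontier.2 ⟨hi, hj, h0, ⟨p, hp, hadj⟩, hc⟩)]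
    · rw [if_neg hc, if_neg (fun hmem => by
        have := mem_newFrontier.1 hmem
        simp only at this
        exact hc this.2.2.2.2), h0]

theorem cell_apply_nf {n m : Nat} {cur : List (List Int)} {fr : List (Nat × Nat)}
    (hR : Rect cur n m) (a b : Nat) :
    cell (gApply cur (newFrontier cur n m fr)) a b =
      if (a, b) ∈ newFrontier cur n m fr then 1 else cell cur a b :=
  cell_gApply hR newFrontier_bounds a b

theorem round_inv {n m : Nat} {cur : List (List Int)} {fr : List (Nat × Nat)}
    (hI : FInv n m cur fr) :
    FInv n m (gApply cur (newFrontier cur n m fr)) (newFrontier cur n m fr) := by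
  obtain ⟨hR, hNN, hFr, hCom⟩ := hI
  refine ⟨rect_gApply hR, ?_, ?_, ?_⟩
  · intro i j hi hj
    rw [cell_apply_nf hR]
    split_ifs
    · omega
    · exact hNN i j hi hj
  · intro p hp
    obtain ⟨h1, h2, _, _, _⟩ := mem_newFrontier.1 hp
    refine ⟨h1, h2, ?_⟩
    rw [cell_apply_nf hR, if_pos (by simpa using hp)]
  · intro i j hi hj h0 hcnt
    rw [cell_apply_nf hR] at h0
    by_cases hmem : (i, j) ∈ newFrontier cur n m fr
    · rw [if_pos hmem] at h0; omega
    · rw [if_neg hmem] at h0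
      by_contra hno
      push_neg at hno
      have hstat : ∀ a b, a < n → b < m → Adj (i, j) (a, b) →
          (cell (gApply cur (newFrontier cur n m fr)) a b = 1 ↔ cell cur a b = 1) := by
        intro a b ha hb hadj
        rw [cell_apply_nf hR]
        by_cases hm2 : ((a, b) : Nat × Nat) ∈ newFrontier cur n m fr
        · exact absurd hadj (hno (a, b) hm2)
        · rw [if_neg hm2]
      have hceq : cnt (gApply cur (newFrontier cur n m fr)) n m i j = cnt cur n m i j := by
        apply cnt_congr
        · intro hc; exact hstat (i-1) j (by omega) hj (by unfold Adj; omega)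
        · intro hc; exact hstat (i+1) j (by omega) hj (by unfold Adj; omega)
        · intro hc; exact hstat i (j-1) hi (by omega) (by unfold Adj; omega)
        · intro hc; exact hstat i (j+1) hi (by omega) (by unfold Adj; omega)
      rw [hceq] at hcnt
      obtain ⟨p, hp, hadj⟩ := hCom i j hi hj h0 hcnt
      exact hmem (mem_newFrontier.2 ⟨hi, hj, h0, ⟨p, hp, hadj⟩, hcnt⟩)

theorem round_zeros {n m : Nat} {cur : List (List Int)} {fr : List (Nat × Nat)}
    (hI : FInv n m cur fr) (hne : newFrontier cur n m fr ≠ []) :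
    zeros (gApply cur (newFrontier cur n m fr)) n m < zeros cur n m := by
  obtain ⟨hR, _, _, _⟩ := hI
  apply zeros_lt
  · intro i j hi hj hz
    rw [cell_apply_nf hR] at hz
    by_cases hmem : (i, j) ∈ newFrontier cur n m fr
    · rw [if_pos hmem] at hz; omega
    · rwa [if_neg hmem] at hz
  · obtain ⟨p, hp⟩ := List.exists_mem_of_ne_nil _ hne
    obtain ⟨h1, h2, h3, _, _⟩ := mem_newFrontier.1 hp
    refine ⟨p.1, p.2, h1, h2, h3, ?_⟩
    rw [cell_apply_nf hR, if_pos (by simpa using hp)]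
    omega

theorem round_ne {n m : Nat} {cur : List (List Int)} {fr : List (Nat × Nat)}
    (hI : FInv n m cur fr) (hne : newFrontier cur n m fr ≠ []) :
    gApply cur (newFrontier cur n m fr) ≠ cur := by
  obtain ⟨p, hp⟩ := List.exists_mem_of_ne_nil _ hne
  obtain ⟨h1, h2, h3, _, _⟩ := mem_newFrontier.1 hp
  intro heq
  have : cell (gApply cur (newFrontier cur n m fr)) p.1 p.2 = cell cur p.1 p.2 := by rw [heq]
  rw [cell_apply_nf hI.1, if_pos (by simpa using hp), h3] at this
  exact one_ne_zero this

theorem loop_eq {n m : Nat} : ∀ (fa fb : Nat) (d : Int) (cur : List (List Int))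
    (fr : List (Nat × Nat)), FInv n m cur fr → zeros cur n m < fa → zeros cur n m < fb →
    aLoop fa d cur = bRounds n m fb d cur fr := by
  intro fa
  induction fa with
  | zero => intro fb d cur fr _ h1 _; omega
  | succ fa ih =>
    intro fb d cur fr hI h1 h2
    cases fb with
    | zero => omega
    | succ fb =>
      rw [aLoop, bRounds]
      have hnf : (bCand cur n m fr).filter (fun p => decide (2 ≤ bCount1 cur n m p.1 p.2))
          = newFrontier cur n m fr := rfl
      rw [hnf]
      by_cases hn : newFrontier cur n m fr = []
      · have hU : updateGrille cur = cur := by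
          rw [round_update hI, hn]
          rfl
        rw [if_pos hU, if_pos hn]
      · have hU := round_update hI
        rw [if_neg (by rw [hU]; exact round_ne hI hn), if_neg hn, hU]
        have hz := round_zeros hI hn
        exact ih fb (d+1) _ _ (round_inv hI) (by omega) (by omega)

-- ===== VERDICT (by name: the statement is the Claim_ definition above) =====
theorem propagation_spec : Claim_equal_propagation := by
  intro g _hdom _hpre
  unfold Spec_propagation propagation propagation_alt
  have hD : Dims g g.length (g.headD []).length := ⟨rfl, rfl⟩
  have hfp1 := firstPass_cur hD
  have hsucc : g.length * (g.headD []).length + 2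
      = (g.length * (g.headD []).length + 1) + 1 := rfl
  rw [hsucc, aLoop]
  by_cases hU : updateGrille g = g
  · rw [if_pos hU, if_pos (by rw [hfp1, hU])]
  · rw [if_neg hU, if_neg (by rw [hfp1]; exact hU), hfp1]
    have hzl := zeros_le (updateGrille g) g.length (g.headD []).length
    exact loop_eq _ _ 1 _ _ (firstPass_inv hD) (by omega) (by omega)
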